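-- pv_equiv track=rewrite | github.com/MrBrantCode/unitest_baseline | mut_generate/mist_train_taco/taco_8129/solution.py | count_distinct_arrays
-- ===== SOURCE A (Python) =====
-- def count_distinct_arrays(n, k, m, conditions):
--     mod = 998244353
--     ans = 1
--
--     for bit in range(k):
--         one = [0] * (n + 1)
--         zero_cond = [0] * (n + 1)
--
--         for (l, r, x) in conditions:
--             if x >> bit & 1:
--                 one[l - 1] += 1
--                 one[r] -= 1
--             else:
--                 zero_cond[r] = max(zero_cond[r], l)
--
--         for i in range(n):
--             one[i + 1] += one[i]
--
--         dp = [0] * (n + 1)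
--         dp[0] = 1
--         cs = [0] * (n + 2)
--         cs[1] = 1
--         R = 0
--
--         for i in range(n):
--             if not one[i]:
--                 dp[i + 1] = (cs[i + 1] - cs[R]) % mod
--             cs[i + 2] = (cs[i + 1] + dp[i + 1]) % mod
--             R = max(R, zero_cond[i + 1])
--
--         ans = ans * (cs[-1] - cs[R]) % mod % mod
--
--     return ans
-- ===== SOURCE B (Python) =====
-- def count_distinct_arrays(n, k, m, conditions):
--     mod = 998244353
--
--     def bit_factor(bit):
--         delta = [0] * (n + 1)
--         for (l, r, x) in conditions:
--             if x >> bit & 1: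
--                 delta[l - 1] += 1
--                 delta[r] -= 1
--         zero_cond = [0] * (n + 1)
--         for (l, r, x) in conditions:
--             if not (x >> bit & 1):
--                 zero_cond[r] = max(zero_cond[r], l)
--
--         live = {0: 1}   # dp values by index; only keys >= R are ever read again
--         window = 1      # sum of live[j] for j in the current window [R, i]
--         cover = 0       # running prefix of delta = number of forced-one intervals covering i
--         R = 0
--         for i in range(n):
--             cover += delta[i]
--             if cover == 0:
--                 v = window % mod
--                 live[i + 1] = v
--                 window += v
--             newR = max(R, zero_cond[i + 1])
--             for j in range(R, newR):
--                 window -= live.get(j, 0)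
--             R = newR
--         return window % mod
--
--     ans = 1
--     for bit in range(k):
--         ans = ans * bit_factor(bit) % mod
--     return ans
-- ===== Notes on version B (the rewrite author's own statement) =====
-- stated objective: alternative
-- what changed: B drops A's prefix-sum array cs and A's materialised prefixed `one` array: the per-bit factor is computed by a single fused pass keeping a running coverage counter (prefix of the difference array), an exact sliding-window accumulator for the dp sum over [R, i], and the live dp values in a dictionary keyed by index instead of a preallocated list; the answer is accumulated from independent per-bit factors.
-- outside the precondition, e.g. on count_distinct_arrays(1, 1, 0, [(9, 0, 2)]): A returns 2, B returns 2; on count_distinct_arrays(1, 1, 0, [(-9, 1, 2)]): A returns 2, B returns 2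
import Mathlib
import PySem

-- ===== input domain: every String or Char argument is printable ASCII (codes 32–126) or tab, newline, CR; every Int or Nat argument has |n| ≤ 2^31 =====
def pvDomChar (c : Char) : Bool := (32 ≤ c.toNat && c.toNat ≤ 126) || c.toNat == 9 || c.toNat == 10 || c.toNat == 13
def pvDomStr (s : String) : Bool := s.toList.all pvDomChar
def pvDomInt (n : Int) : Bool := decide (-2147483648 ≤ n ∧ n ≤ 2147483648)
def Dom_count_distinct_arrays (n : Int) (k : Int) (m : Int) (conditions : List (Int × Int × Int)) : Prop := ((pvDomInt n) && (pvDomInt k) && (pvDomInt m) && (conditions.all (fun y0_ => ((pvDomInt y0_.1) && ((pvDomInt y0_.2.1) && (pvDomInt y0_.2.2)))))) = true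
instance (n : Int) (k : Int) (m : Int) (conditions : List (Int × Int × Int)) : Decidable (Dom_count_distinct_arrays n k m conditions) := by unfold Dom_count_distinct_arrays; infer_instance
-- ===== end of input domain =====

-- B computes each bit's factor in one fused pass: a running coverage counter replaces A's
-- materialised prefixed `one` array, a sliding-window accumulator replaces A's prefix-sum array
-- `cs`, and the live dp values sit in a dictionary instead of a preallocated list (return value
-- only; same asymptotic cost, different decomposition).

-- ===== PORT A =====
-- one iteration of A's `for (l, r, x) in conditions` loop (c = (l, r, x); state = (one, zero_cond))
def pvCondStepA (bit : Nat) (s : List Int × List Int) (c : Int × Int × Int) : List Int × List Int :=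
  if PySem.Int.band (c.2.2 >>> bit) 1 ≠ 0 then
    let one1 := PySem.List.pySetD s.1 (c.1 - 1) (PySem.List.pyGetD s.1 (c.1 - 1) 0 + 1)
    let one2 := PySem.List.pySetD one1 c.2.1 (PySem.List.pyGetD one1 c.2.1 0 - 1)
    (one2, s.2)
  else
    (s.1, PySem.List.pySetD s.2 c.2.1 (max (PySem.List.pyGetD s.2 c.2.1 0) c.1))

-- A's `for i in range(n): one[i+1] += one[i]`
def pvPrefixA (one : List Int) (N : Nat) : List Int :=
  (List.range N).foldl (fun o i => o.set (i+1) (o.getD (i+1) 0 + o.getD i 0)) one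

-- one iteration of A's dp loop (state = (dp, cs, R))
def pvStepA (one zc : List Int) (s : List Int × List Int × Int) (i : Nat) : List Int × List Int × Int :=
  let dp' := if one.getD i 0 = 0 then
      s.1.set (i+1) (PySem.Int.mod (s.2.1.getD (i+1) 0 - PySem.List.pyGetD s.2.1 s.2.2 0) 998244353)
    else s.1
  let cs' := s.2.1.set (i+2) (PySem.Int.mod (s.2.1.getD (i+1) 0 + dp'.getD (i+1) 0) 998244353)
  (dp', cs', max s.2.2 (zc.getD (i+1) 0))

-- one iteration of A's `for bit in range(k)` loop
def pvBitA (n : Int) (conditions : List (Int × Int × Int)) (ans : Int) (bit : Nat) : Int :=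
  let oz := conditions.foldl (pvCondStepA bit)
      (List.replicate (n+1).toNat 0, List.replicate (n+1).toNat 0)
  let one := pvPrefixA oz.1 n.toNat
  let st := (List.range n.toNat).foldl (pvStepA one oz.2)
      ((List.replicate (n+1).toNat 0).set 0 1, (List.replicate (n+2).toNat 0).set 1 1, 0)
  PySem.Int.mod (PySem.Int.mod (ans * (PySem.List.pyGetD st.2.1 (-1) 0 - PySem.List.pyGetD st.2.1 st.2.2 0)) 998244353) 998244353

def count_distinct_arrays (n : Int) (k : Int) (m : Int) (conditions : List (Int × Int × Int)) : Int :=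
  (List.range k.toNat).foldl (pvBitA n conditions) 1

-- ===== PORT B =====
-- B's first pass over conditions: the difference array of forced-one intervals
def pvDeltaStepB (bit : Nat) (d : List Int) : Int × Int × Int → List Int
  | (l, r, x) =>
    if PySem.Int.band (x >>> bit) 1 ≠ 0 then
      let d1 := PySem.List.pySetD d (l - 1) (PySem.List.pyGetD d (l - 1) 0 + 1)
      PySem.List.pySetD d1 r (PySem.List.pyGetD d1 r 0 - 1)
    else d

-- B's second pass over conditions: the forced-zero left bounds
def pvZeroStepB (bit : Nat) (z : List Int) : Int × Int × Int → List Int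
  | (l, r, x) =>
    if PySem.Int.band (x >>> bit) 1 = 0 then
      PySem.List.pySetD z r (max (PySem.List.pyGetD z r 0) l)
    else z

-- one iteration of B's fused loop; `live.get(j, 0)` is PySem.Dict.getD and
-- the inner foldl is B's `for j in range(R, newR)` eviction loop
def pvStepB (delta zc : List Int) :
    PySem.Dict Int Int × Int × Int × Int → Nat → PySem.Dict Int Int × Int × Int × Int
  | (live, window, cover, R), i =>
    let cover' := cover + delta.getD i 0
    let lw := if cover' = 0 then
        let v := PySem.Int.mod window 998244353
        (live.insert ((i : Int) + 1) v, window + v)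
      else (live, window)
    let newR := max R (zc.getD (i+1) 0)
    let window' := (PySem.List.pyRange R newR 1).foldl (fun ww j => ww - lw.1.getD j 0) lw.2
    (lw.1, window', cover', newR)

-- B's `bit_factor(bit)`
def pvFactorB (n : Int) (conditions : List (Int × Int × Int)) (bit : Nat) : Int :=
  let delta := conditions.foldl (pvDeltaStepB bit) (List.replicate (n+1).toNat 0)
  let zc := conditions.foldl (pvZeroStepB bit) (List.replicate (n+1).toNat 0)
  let st := (List.range n.toNat).foldl (pvStepB delta zc)
      ((PySem.Dict.empty : PySem.Dict Int Int).insert 0 1, 1, 0, 0)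
  PySem.Int.mod st.2.1 998244353

def count_distinct_arrays_alt (n : Int) (k : Int) (m : Int) (conditions : List (Int × Int × Int)) : Int :=
  (List.range k.toNat).foldl (fun ans bit => PySem.Int.mod (ans * pvFactorB n conditions bit) 998244353) 1

-- ===== PRECONDITION & SPEC =====
-- the Python position a (possibly negative) index r denotes in a list of length n+1
def pvPos (r n : Int) : Int := if 0 ≤ r then r else r + n + 1

-- Pre_ excludes exactly the inputs on which A raises (IndexError on one/zero_cond/cs), except
-- that for a condition whose bits of x below k are all zero (with x ≠ 0) or all one, A skips one
-- of its two branches and may return despite an out-of-range l; on such excluded inputs A and B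
-- return the same value (see the cited examples).
def Pre_count_distinct_arrays (n : Int) (k : Int) (m : Int) (conditions : List (Int × Int × Int)) : Prop :=
  k ≤ 0 ∨ (0 ≤ n ∧ ∀ c ∈ conditions, (-(n+1) ≤ c.2.1 ∧ c.2.1 ≤ n) ∧
    ((c.2.2 = 0 ∧ pvPos c.2.1 n = 0) ∨ ((c.2.2 = 0 ∨ -n ≤ c.1) ∧ c.1 ≤ n + 1)))

instance (n : Int) (k : Int) (m : Int) (conditions : List (Int × Int × Int)) : Decidable (Pre_count_distinct_arrays n k m conditions) := by
  unfold Pre_count_distinct_arrays; infer_instance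

def pvWitness_count_distinct_arrays : Int × Int × Int × (List (Int × Int × Int)) :=
  (3, 2, 7, [(1, 2, 1), (2, 2, 2)])

def Spec_count_distinct_arrays (n : Int) (k : Int) (m : Int) (conditions : List (Int × Int × Int)) (out : Int) : Prop := out = count_distinct_arrays_alt n k m conditions
instance (n : Int) (k : Int) (m : Int) (conditions : List (Int × Int × Int)) (out : Int) : Decidable (Spec_count_distinct_arrays n k m conditions out) := by unfold Spec_count_distinct_arrays; infer_instance

-- ===== CLAIM (what is proved, stated in full; the proofs are below) =====
def Claim_equal_count_distinct_arrays : Prop := ∀ (n : Int) (k : Int) (m : Int) (conditions : List (Int × Int × Int)), Dom_count_distinct_arrays n k m conditions → Pre_count_distinct_arrays n k m conditions → Spec_count_distinct_arrays n k m conditions (count_distinct_arrays n k m conditions)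

-- ===== LEMMAS AND PROOFS =====

-- sum of the first t entries of dp (getD-style, default 0)
def pvS (dp : List Int) (t : Nat) : Int := ((List.range t).map (fun j => dp.getD j 0)).sum

lemma pvS_succ (dp : List Int) (t : Nat) : pvS dp (t+1) = pvS dp t + dp.getD t 0 := by
  simp [pvS, List.range_succ]

lemma pvS_zero (dp : List Int) : pvS dp 0 = 0 := by simp [pvS]

lemma pvGetD_set (xs : List Int) (a t : Nat) (v : Int) :
    (xs.set a v).getD t 0 = if a = t ∧ a < xs.length then v else xs.getD t 0 := by
  simp only [List.getD_eq_getElem?_getD, List.getElem?_set]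
  split_ifs <;> simp_all <;> omega

lemma pvPyGetD_toNat (xs : List Int) (i : Int) (h : 0 ≤ i) :
    PySem.List.pyGetD xs i 0 = xs.getD i.toNat 0 := by
  conv_lhs => rw [← Int.toNat_of_nonneg h]
  exact PySem.List.pyGetD_natCast xs i.toNat 0

lemma pvSetD_neg (xs : List Int) (r v : Int) (h1 : -(xs.length : Int) ≤ r) (h2 : r < 0) :
    PySem.List.pySetD xs r v = xs.set (r + xs.length).toNat v := by
  simp only [PySem.List.pySetD, PySem.List.pySet?, PySem.List.pyIdx?]
  rw [if_neg (by omega), if_pos h1]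
  simp only [Option.map_some, Option.getD_some]
  congr 1
  omega

lemma pvS_set_of_le (dp : List Int) (a : Nat) (v : Int) (t : Nat) (h : t ≤ a) :
    pvS (dp.set a v) t = pvS dp t := by
  induction t with
  | zero => simp [pvS]
  | succ t ih =>
    rw [pvS_succ, pvS_succ, ih (by omega), pvGetD_set, if_neg (by omega)]

lemma pvS_eq_of_zeros (dp : List Int) (a b : Nat) (hab : a ≤ b)
    (hz : ∀ j : Nat, a ≤ j → j < b → dp.getD j 0 = 0) : pvS dp b = pvS dp a := by
  induction b with
  | zero =>
    have ha : a = 0 := by omega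
    rw [ha]
  | succ b ih =>
    rcases Nat.eq_or_lt_of_le hab with h | h
    · rw [h]
    · rw [pvS_succ, hz b (by omega) (by omega), ih (by omega) (fun j hj hj' => hz j hj (by omega))]
      ring

-- B's eviction loop over a dict whose entries agree with dp on the evicted range
lemma pvEvictD (dp : List Int) (live : PySem.Dict Int Int) (a b : Nat) (h : a ≤ b)
    (hpt : ∀ j : Nat, a ≤ j → j < b → live.getD (j : Int) 0 = dp.getD j 0) (w : Int) :
    (PySem.List.pyRange (a:Int) (b:Int) 1).foldl (fun ww j => ww - live.getD j 0) w
      = w - (pvS dp b - pvS dp a) := by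
  induction b with
  | zero =>
    have : a = 0 := by omega
    subst this
    simp [PySem.List.pyRange_one]
  | succ b ih =>
    rcases Nat.eq_or_lt_of_le h with h' | h'
    · rw [h']
      simp [PySem.List.pyRange_one]
    · have hab : a ≤ b := by omega
      rw [show ((b+1 : Nat) : Int) = (b:Int) + 1 by push_cast; ring,
          PySem.List.pyRange_one_succ_right (by exact_mod_cast hab), List.foldl_append,
          ih hab (fun j hj hj' => hpt j hj (by omega))]
      simp only [List.foldl_cons, List.foldl_nil, hpt b hab (by omega)]
      rw [pvS_succ]
      ring

-- modular-arithmetic facts about A's modulus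
lemma pvMod_emod (x : Int) : PySem.Int.mod x 998244353 = x % 998244353 :=
  PySem.Int.mod_eq_emod_of_pos (by norm_num)

lemma pvMod_sub (a b : Int) :
    PySem.Int.mod (PySem.Int.mod a 998244353 - PySem.Int.mod b 998244353) 998244353
      = PySem.Int.mod (a - b) 998244353 := by
  simp only [pvMod_emod]
  rw [← Int.sub_emod]

lemma pvMod_add_left (a c : Int) :
    PySem.Int.mod (PySem.Int.mod a 998244353 + c) 998244353
      = PySem.Int.mod (a + c) 998244353 := by
  simp only [pvMod_emod]
  rw [Int.add_emod, Int.emod_emod_of_dvd _ dvd_rfl, ← Int.add_emod]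

lemma pvMod_zero : PySem.Int.mod 0 998244353 = 0 := by
  simp [pvMod_emod]

lemma pvMod_one : PySem.Int.mod 1 998244353 = 1 := by
  rw [pvMod_emod]; norm_num

lemma pvMod_self_of_bounds (x : Int) (h0 : 0 ≤ x) (h1 : x < 998244353) :
    PySem.Int.mod x 998244353 = x := by
  rw [pvMod_emod]; exact Int.emod_eq_of_lt h0 h1

lemma pvMod_nonneg (x : Int) : 0 ≤ PySem.Int.mod x 998244353 :=
  PySem.Int.mod_nonneg x (by norm_num)

lemma pvMod_lt (x : Int) : PySem.Int.mod x 998244353 < 998244353 :=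
  PySem.Int.mod_lt x (by norm_num)

lemma pvMod_mul_congr (c a b : Int) (h : a % 998244353 = b % 998244353) :
    PySem.Int.mod (c * a) 998244353 = PySem.Int.mod (c * b) 998244353 := by
  simp only [pvMod_emod]
  rw [Int.mul_emod, h, ← Int.mul_emod]

lemma pvMod_mod (x : Int) :
    PySem.Int.mod (PySem.Int.mod x 998244353) 998244353 = PySem.Int.mod x 998244353 := by
  simp only [pvMod_emod]
  exact Int.emod_emod_of_dvd _ dvd_rfl

-- A's single conditions pass equals B's two passes, componentwise
lemma pvSplitCond (bit : Nat) (conds : List (Int × Int × Int)) (d z : List Int) :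
    conds.foldl (pvCondStepA bit) (d, z)
      = (conds.foldl (pvDeltaStepB bit) d, conds.foldl (pvZeroStepB bit) z) := by
  induction conds generalizing d z with
  | nil => rfl
  | cons c cs ih =>
    simp only [List.foldl_cons]
    rw [← ih]
    congr 1
    simp only [pvCondStepA, pvDeltaStepB, pvZeroStepB]
    split_ifs with h1 h2 h2 <;> simp_all

-- the conditions pass preserves the length of the difference array
lemma pvDeltaLen (bit : Nat) (conds : List (Int × Int × Int)) (d : List Int) :
    (conds.foldl (pvDeltaStepB bit) d).length = d.length := by
  induction conds generalizing d with
  | nil => rfl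
  | cons c cs ih =>
    rw [List.foldl_cons, ih]
    simp only [pvDeltaStepB]
    split_ifs <;> simp [PySem.List.length_pySetD]

-- A's in-place prefix pass computes the partial sums of the difference array
lemma pvPrefix_inv (delta : List Int) (N : Nat) (hlen : delta.length = N+1) (J : Nat) (hJ : J ≤ N) :
    (∀ t : Nat, t ≤ J → (pvPrefixA delta J).getD t 0 = pvS delta (t+1)) ∧
    (∀ t : Nat, J < t → (pvPrefixA delta J).getD t 0 = delta.getD t 0) ∧
    (pvPrefixA delta J).length = N+1 := by
  induction J with
  | zero =>
    refine ⟨?_, fun t ht => rfl, hlen⟩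
    intro t ht
    have : t = 0 := by omega
    subst this
    rw [show pvPrefixA delta 0 = delta from rfl, pvS_succ, pvS_zero]
    ring
  | succ J ih =>
    obtain ⟨h1, h2, h3⟩ := ih (by omega)
    have hstep : pvPrefixA delta (J+1)
        = (pvPrefixA delta J).set (J+1)
            ((pvPrefixA delta J).getD (J+1) 0 + (pvPrefixA delta J).getD J 0) := by
      simp [pvPrefixA, List.range_succ]
    refine ⟨?_, ?_, by rw [hstep]; simp [h3]⟩
    · intro t ht
      rcases Nat.lt_or_ge t (J+1) with hlt | hge
      · rw [hstep, pvGetD_set, if_neg (by omega)]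
        exact h1 t (by omega)
      · have : t = J+1 := by omega
        subst this
        rw [hstep, pvGetD_set, if_pos ⟨rfl, by omega⟩, h2 (J+1) (by omega), h1 J (by omega)]
        conv_rhs => rw [pvS_succ]
        ring
    · intro t ht
      rw [hstep, pvGetD_set, if_neg (by omega)]
      exact h2 t (by omega)

-- facts about the zero_cond list built by the conditions loop
lemma pvZcInv (bit : Nat) (N : Nat) (conds : List (Int × Int × Int))
    (hc : ∀ c ∈ conds, (-((N:Int)+1) ≤ c.2.1 ∧ c.2.1 ≤ (N:Int)) ∧
      ((c.2.2 = 0 ∧ pvPos c.2.1 N = 0) ∨ ((c.2.2 = 0 ∨ -(N:Int) ≤ c.1) ∧ c.1 ≤ (N:Int) + 1)))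
    (one zc : List Int) (hlen : zc.length = N+1)
    (hnn : ∀ t : Nat, 0 ≤ zc.getD t 0) (hub : ∀ t : Nat, 1 ≤ t → zc.getD t 0 ≤ (N:Int)+1) :
    (conds.foldl (pvCondStepA bit) (one, zc)).2.length = N+1 ∧
    (∀ t : Nat, 0 ≤ (conds.foldl (pvCondStepA bit) (one, zc)).2.getD t 0) ∧
    (∀ t : Nat, 1 ≤ t → (conds.foldl (pvCondStepA bit) (one, zc)).2.getD t 0 ≤ (N:Int)+1) := by
  induction conds generalizing one zc with
  | nil => exact ⟨hlen, hnn, hub⟩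
  | cons c cs ih =>
    obtain ⟨⟨hr1, hr2⟩, hcl⟩ := hc c (by simp)
    simp only [List.foldl_cons]
    rcases hstep : pvCondStepA bit (one, zc) c with ⟨one', zc'⟩
    have hz' : zc'.length = N+1 ∧ (∀ t : Nat, 0 ≤ zc'.getD t 0) ∧
        (∀ t : Nat, 1 ≤ t → zc'.getD t 0 ≤ (N:Int)+1) := by
      unfold pvCondStepA at hstep
      split_ifs at hstep with hbit
      · -- bit branch: zero_cond unchanged
        have : zc' = zc := by simpa using (congrArg Prod.snd hstep).symm
        subst this; exact ⟨hlen, hnn, hub⟩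
      · -- zero branch: position pvPos c.2.1 N gets max(old, l)
        have hzc' : zc' = PySem.List.pySetD zc c.2.1 (max (PySem.List.pyGetD zc c.2.1 0) c.1) := by
          simpa using (congrArg Prod.snd hstep).symm
        set v := max (PySem.List.pyGetD zc c.2.1 0) c.1 with hv
        have hpos0 : 0 ≤ pvPos c.2.1 (N:Int) := by simp only [pvPos]; split_ifs <;> omega
        have hposlt : (pvPos c.2.1 (N:Int)).toNat < zc.length := by
          simp only [pvPos] at *; split_ifs at hpos0 ⊢ <;> omega
        have hset : zc' = zc.set (pvPos c.2.1 (N:Int)).toNat v := by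
          rcases le_or_gt 0 c.2.1 with hge | hlt
          · rw [hzc', PySem.List.pySetD_of_nonneg _ _ hge]
            congr 1
            simp [pvPos, hge]
          · rw [hzc', pvSetD_neg _ _ _ (by rw [hlen]; push_cast; omega) hlt]
            congr 2
            simp only [pvPos, if_neg (by omega : ¬ (0:Int) ≤ c.2.1)]
            rw [hlen]; push_cast; ring
        have hpg : PySem.List.pyGetD zc c.2.1 0 = zc.getD (pvPos c.2.1 (N:Int)).toNat 0 := by
          rcases le_or_gt 0 c.2.1 with hge | hlt
          · rw [pvPyGetD_toNat _ _ hge]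
            congr 1
            simp [pvPos, hge]
          · rw [show c.2.1 = -(((-c.2.1).toNat : Nat) : Int) by omega,
                PySem.List.pyGetD_neg_natCast _ _ _ (by omega) (by rw [hlen]; omega)]
            rw [List.getD_eq_getElem?_getD, List.getElem?_eq_getElem (by
              simp only [pvPos, if_neg (by omega : ¬ (0:Int) ≤ -(((-c.2.1).toNat : Nat) : Int))]
              omega)]
            simp only [Option.getD_some]
            congr 1
            simp only [pvPos, if_neg (by omega : ¬ (0:Int) ≤ -(((-c.2.1).toNat : Nat) : Int))]
            omega
        have hvnn : 0 ≤ v := le_max_of_le_left (by rw [hpg]; exact hnn _)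
        refine ⟨by rw [hset]; simp [hlen], ?_, ?_⟩
        · intro t
          rw [hset, pvGetD_set]
          split_ifs with h
          · exact hvnn
          · exact hnn t
        · intro t ht
          rw [hset, pvGetD_set]
          split_ifs with h
          · have hl : c.1 ≤ (N:Int) + 1 := by
              rcases hcl with ⟨hx0, hp0⟩ | ⟨_, hl⟩
              · exfalso
                have : (pvPos c.2.1 (N:Int)).toNat = 0 := by rw [hp0]; rfl
                omega
              · exact hl
            have hold : PySem.List.pyGetD zc c.2.1 0 ≤ (N:Int)+1 := by
              rw [hpg]
              rcases Nat.eq_zero_or_pos (pvPos c.2.1 (N:Int)).toNat with h0 | hp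
              · exfalso
                obtain ⟨he, _⟩ := h
                omega
              · exact hub _ hp
            exact max_le hold hl
          · exact hub t ht
    exact ih (fun c hc' => hc c (by simp [hc'])) one' zc' hz'.1 hz'.2.1 hz'.2.2

-- two parallel folds over `List.range N` preserve an indexed invariant
lemma pvFoldInv {α β : Type} (f : α → Nat → α) (g : β → Nat → β) (P : Nat → α → β → Prop)
    (N : Nat) (a0 : α) (b0 : β) (h0 : P 0 a0 b0)
    (hstep : ∀ i a b, i < N → P i a b → P (i+1) (f a i) (g b i)) :
    P N ((List.range N).foldl f a0) ((List.range N).foldl g b0) := by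
  induction N with
  | zero => simpa using h0
  | succ N ih =>
    rw [List.range_succ, List.foldl_append, List.foldl_append]
    exact hstep N _ _ (by omega)
      (ih (fun i a b hi h => hstep i a b (by omega) h))

-- loop invariant, regime 1: the dict and window exactly mirror dp and its prefix sums
def pvR1 (N i : Nat) (a : List Int × List Int × Int) (b : PySem.Dict Int Int × Int × Int × Int) : Prop :=
  (∀ j : Nat, b.1.getD (j : Int) 0 = a.1.getD j 0) ∧ b.2.2.2 = a.2.2 ∧
  0 ≤ a.2.2 ∧ a.2.2 ≤ (i:Int)+1 ∧
  a.1.length = N+1 ∧ a.2.1.length = N+2 ∧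
  (∀ t : Nat, t ≤ i+1 → a.2.1.getD t 0 = PySem.Int.mod (pvS a.1 t) 998244353) ∧
  (∀ t : Nat, i+1 < t → a.2.1.getD t 0 = 0) ∧
  (∀ t : Nat, i < t → a.1.getD t 0 = 0) ∧
  b.2.1 = pvS a.1 (i+1) - pvS a.1 a.2.2.toNat

-- loop invariant, regime 2: after R has jumped past the written prefix the window is committed to 0
def pvR2 (N i : Nat) (a : List Int × List Int × Int) (b : PySem.Dict Int Int × Int × Int × Int) : Prop :=
  b.2.2.2 = a.2.2 ∧ 0 ≤ a.2.2 ∧ a.2.2 ≤ (N:Int)+1 ∧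
  a.1.length = N+1 ∧ a.2.1.length = N+2 ∧
  b.2.1 = 0 ∧
  (∀ t : Nat, a.2.2 ≤ (t:Int) → t ≤ i+1 → a.2.1.getD t 0 = a.2.1.getD a.2.2.toNat 0) ∧
  (∀ j : Nat, a.2.2 ≤ (j:Int) → b.1.getD (j : Int) 0 = 0) ∧
  (∀ t : Nat, i < t → a.1.getD t 0 = 0) ∧
  (∀ t : Nat, 0 ≤ a.2.1.getD t 0 ∧ a.2.1.getD t 0 < 998244353)

-- full invariant: the coverage counter is the prefix sum of delta, plus one of the two regimes
def pvInv (delta : List Int) (N i : Nat) (a : List Int × List Int × Int)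
    (b : PySem.Dict Int Int × Int × Int × Int) : Prop :=
  b.2.2.1 = pvS delta i ∧ (pvR1 N i a b ∨ pvR2 N i a b)

lemma pvStepPres (N : Nat) (one delta zc : List Int)
    (hone : ∀ i : Nat, i < N → one.getD i 0 = pvS delta (i+1))
    (hznn : ∀ t : Nat, 0 ≤ zc.getD t 0) (hzub : ∀ t : Nat, 1 ≤ t → zc.getD t 0 ≤ (N:Int)+1)
    (i : Nat) (hi : i < N) (a : List Int × List Int × Int)
    (b : PySem.Dict Int Int × Int × Int × Int)
    (h : pvInv delta N i a b) : pvInv delta N (i+1) (pvStepA one zc a i) (pvStepB delta zc b i) := by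
  obtain ⟨dp, cs, R⟩ := a
  obtain ⟨live, w, cov, Rb⟩ := b
  obtain ⟨hcov, h⟩ := h
  simp only at hcov
  have hz1 : 0 ≤ zc.getD (i+1) 0 := hznn (i+1)
  have hz2 : zc.getD (i+1) 0 ≤ (N:Int)+1 := hzub (i+1) (by omega)
  -- the fused coverage counter decides exactly A's `not one[i]` test
  have hcov' : cov + delta.getD i 0 = one.getD i 0 := by
    rw [hcov, hone i hi, pvS_succ]
  refine ⟨?_, ?_⟩
  · simp only [pvStepB, hcov]
    exact (pvS_succ delta i).symm
  rcases h with h | h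
  · -- regime 1
    obtain ⟨hlive, hbr, hR0, hRle, hdplen, hcslen, hcs, hcs0, hdp0, hw⟩ := h
    simp only at hlive hbr hR0 hRle hdplen hcslen hcs hcs0 hdp0 hw
    have hRb : R = Rb := hbr.symm
    subst hRb
    -- the two sides produce the same dp value
    have hpgR : PySem.List.pyGetD cs R 0 = cs.getD R.toNat 0 := pvPyGetD_toNat _ _ hR0
    have hRt : R.toNat ≤ i+1 := by omega
    have hveq : PySem.Int.mod (cs.getD (i+1) 0 - PySem.List.pyGetD cs R 0) 998244353
        = PySem.Int.mod w 998244353 := by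
      rw [hpgR, hcs (i+1) (by omega), hcs R.toNat hRt, pvMod_sub, hw]
    set v := PySem.Int.mod w 998244353 with hvdef
    set dp' := if one.getD i 0 = 0 then dp.set (i+1) v else dp with hdp'
    set live' := if one.getD i 0 = 0 then live.insert ((i : Int) + 1) v else live with hlive'def
    have hdl : dp'.length = N+1 := by rw [hdp']; split_ifs <;> simp [hdplen]
    have hdvi : dp'.getD (i+1) 0 = if one.getD i 0 = 0 then v else 0 := by
      rw [hdp']
      split_ifs with hf
      · rw [pvGetD_set, if_pos ⟨rfl, by omega⟩]
      · exact hdp0 (i+1) (by omega)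
    have hdp'_hi : ∀ t : Nat, i+1 < t → dp'.getD t 0 = 0 := by
      intro t ht
      rw [hdp']
      split_ifs with hf
      · rw [pvGetD_set, if_neg (by omega)]; exact hdp0 t (by omega)
      · exact hdp0 t (by omega)
    have hlive' : ∀ j : Nat, live'.getD (j : Int) 0 = dp'.getD j 0 := by
      intro j
      rw [hlive'def, hdp']
      by_cases hf : one.getD i 0 = 0
      · rw [if_pos hf, if_pos hf, PySem.Dict.getD_insert]
        by_cases hji : (j : Int) = (i : Int) + 1
        · have hj : j = i+1 := by omega
          rw [if_pos hji, hj, pvGetD_set, if_pos ⟨rfl, by omega⟩]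
        · have hj : ¬ (i+1 = j) := by omega
          rw [if_neg hji, pvGetD_set, if_neg (by intro hh; exact hj hh.1)]
          exact hlive j
      · rw [if_neg hf, if_neg hf]
        exact hlive j
    have hS_eq : ∀ t : Nat, t ≤ i+1 → pvS dp' t = pvS dp t := by
      intro t ht
      rw [hdp']
      split_ifs
      · exact pvS_set_of_le _ _ _ _ ht
      · rfl
    have hSsucc : pvS dp' (i+2) = pvS dp (i+1) + dp'.getD (i+1) 0 := by
      rw [pvS_succ, hS_eq (i+1) (by omega)]
    set newR := max R (zc.getD (i+1) 0) with hnewR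
    have hnewR0 : 0 ≤ newR := le_trans hR0 (le_max_left _ _)
    have hnewRN : newR ≤ (N:Int)+1 := by
      rw [hnewR]; apply max_le (by omega) hz2
    have hRRn : R.toNat ≤ newR.toNat := by omega
    have hstepA : pvStepA one zc (dp, cs, R) i =
        (dp', cs.set (i+2) (PySem.Int.mod (cs.getD (i+1) 0 + dp'.getD (i+1) 0) 998244353), newR) := by
      simp only [pvStepA, hveq, ← hvdef, ← hdp', ← hnewR]
    have hev : (PySem.List.pyRange R newR 1).foldl
          (fun ww j => ww - live'.getD j 0) (w + dp'.getD (i+1) 0)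
        = (w + dp'.getD (i+1) 0) - (pvS dp' newR.toNat - pvS dp' R.toNat) := by
      rw [show R = ((R.toNat : Nat) : Int) by omega, show newR = ((newR.toNat : Nat) : Int) by omega]
      exact pvEvictD dp' live' R.toNat newR.toNat hRRn (fun j _ _ => hlive' j) _
    have hstepB : pvStepB delta zc (live, w, cov, R) i =
        (live', (w + dp'.getD (i+1) 0) - (pvS dp' newR.toNat - pvS dp' R.toNat),
          cov + delta.getD i 0, newR) := by
      simp only [pvStepB, hcov', ← hnewR]
      by_cases hf : one.getD i 0 = 0
      · rw [if_pos hf]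
        have e1 : live' = live.insert ((i : Int) + 1) v := by rw [hlive'def, if_pos hf]
        have e2 : dp'.getD (i+1) 0 = v := by rw [hdvi, if_pos hf]
        rw [e1, e2] at hev
        rw [hev]
        simp only [e1, e2, ← hvdef]
      · rw [if_neg hf]
        have e1 : live' = live := by rw [hlive'def, if_neg hf]
        have e2 : dp'.getD (i+1) 0 = 0 := by rw [hdvi, if_neg hf]
        rw [e1, e2, add_zero] at hev
        rw [hev]
        rw [e2, add_zero, e1]
    rw [hstepA, hstepB]
    set cs' := cs.set (i+2) (PySem.Int.mod (cs.getD (i+1) 0 + dp'.getD (i+1) 0) 998244353) with hcs'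
    have hcl' : cs'.length = N+2 := by rw [hcs']; simp [hcslen]
    have hcs'val : ∀ t : Nat, t ≤ i+2 → cs'.getD t 0 = PySem.Int.mod (pvS dp' t) 998244353 := by
      intro t ht
      rcases Nat.lt_or_ge t (i+2) with hlt | hge
      · rw [hcs', pvGetD_set, if_neg (by omega), hcs t (by omega), hS_eq t (by omega)]
      · have : t = i+2 := by omega
        subst this
        rw [hcs', pvGetD_set, if_pos ⟨rfl, by omega⟩, hcs (i+1) (by omega), pvMod_add_left, ← hSsucc]
    have hcs'0 : ∀ t : Nat, i+2 < t → cs'.getD t 0 = 0 := by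
      intro t ht
      rw [hcs', pvGetD_set, if_neg (by omega)]
      exact hcs0 t (by omega)
    have hSR' : pvS dp' R.toNat = pvS dp R.toNat := hS_eq _ hRt
    rcases le_or_gt newR ((i:Int)+2) with hsmall | hbig
    · -- stays in regime 1
      left
      refine ⟨hlive', rfl, hnewR0, by push_cast; omega, hdl, hcl', hcs'val, hcs'0, hdp'_hi, ?_⟩
      simp only
      rw [hSR', hw, hSsucc]
      ring
    · -- stale jump: switch to regime 2
      right
      have hwz : (w + dp'.getD (i+1) 0) - (pvS dp' newR.toNat - pvS dp' R.toNat) = 0 := by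
        have hzeros : pvS dp' newR.toNat = pvS dp' (i+2) := by
          apply pvS_eq_of_zeros dp' (i+2) newR.toNat (by omega)
          intro j hj _
          exact hdp'_hi j (by omega)
        rw [hzeros, hSsucc, hSR', hw]
        ring
      have hlive0' : ∀ j : Nat, newR ≤ (j:Int) → live'.getD (j:Int) 0 = 0 := by
        intro j hj
        rw [hlive' j]
        exact hdp'_hi j (by omega)
      refine ⟨rfl, hnewR0, hnewRN, hdl, hcl', hwz, ?_, hlive0', hdp'_hi, ?_⟩
      · intro t h1 h2
        dsimp only at h1
        exfalso
        omega
      · intro t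
        rcases Nat.lt_or_ge (i+2) t with hgt | hle
        · rw [hcs'0 t hgt]; norm_num
        · rw [hcs'val t hle]
          exact ⟨pvMod_nonneg _, pvMod_lt _⟩
  · -- regime 2
    obtain ⟨hbr, hR0, hRN, hdplen, hcslen, hw0, hcsR, hlive0, hdp0, hcsb⟩ := h
    simp only at hbr hR0 hRN hdplen hcslen hw0 hcsR hlive0 hdp0 hcsb
    have hRb : R = Rb := hbr.symm
    subst hRb
    subst hw0
    set newR := max R (zc.getD (i+1) 0) with hnewR
    have hnewR0 : 0 ≤ newR := le_trans hR0 (le_max_left _ _)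
    have hnewRN : newR ≤ (N:Int)+1 := max_le hRN hz2
    have hRRn : R ≤ newR := le_max_left _ _
    -- B side: any inserted dp value is 0 and the window stays 0
    set live' := if one.getD i 0 = 0 then live.insert ((i : Int) + 1) (PySem.Int.mod 0 998244353) else live with hlive'def
    have hlive0' : ∀ j : Int, R ≤ j → live'.getD j 0 = 0 := by
      intro j hj
      have hj0 : 0 ≤ j := le_trans hR0 hj
      rw [hlive'def]
      by_cases hf : one.getD i 0 = 0
      · rw [if_pos hf, PySem.Dict.getD_insert]
        split_ifs with he
        · exact pvMod_zero
        · rw [show j = ((j.toNat : Nat) : Int) by omega]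
          exact hlive0 j.toNat (by omega)
      · rw [if_neg hf, show j = ((j.toNat : Nat) : Int) by omega]
        exact hlive0 j.toNat (by omega)
    have hstepB : pvStepB delta zc (live, 0, cov, R) i = (live', 0, cov + delta.getD i 0, newR) := by
      simp only [pvStepB, hcov', ← hnewR]
      have hid : ∀ lv : PySem.Dict Int Int, (∀ j : Int, R ≤ j → lv.getD j 0 = 0) →
          (PySem.List.pyRange R newR 1).foldl (fun ww j => ww - lv.getD j 0) 0 = 0 := by
        intro lv hlv
        rw [PySem.List.foldl_congr_mem (PySem.List.pyRange R newR 1)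
          (fun ww j => ww - lv.getD j 0) (fun ww _ => ww) 0 ?_, List.foldl_fixed]
        intro acc j hj
        rw [PySem.List.mem_pyRange_one] at hj
        show acc - lv.getD j 0 = acc
        rw [hlv j hj.1, sub_zero]
      by_cases hf : one.getD i 0 = 0
      · simp only [if_pos hf, hlive'def, pvMod_zero, add_zero]
        rw [hid (live.insert ((i : Int) + 1) 0) ?_]
        · intro j hj
          have := hlive0' j hj
          rw [hlive'def, if_pos hf] at this
          simpa [pvMod_zero] using this
      · simp only [if_neg hf, hlive'def]
        rw [hid live ?_]
        intro j hj
        have := hlive0' j hj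
        rw [hlive'def, if_neg hf] at this
        exact this
    -- A side
    set vA := PySem.Int.mod (cs.getD (i+1) 0 - PySem.List.pyGetD cs R 0) 998244353 with hvA
    set dpA' := if one.getD i 0 = 0 then dp.set (i+1) vA else dp with hdpA'
    have hdAl : dpA'.length = N+1 := by rw [hdpA']; split_ifs <;> simp [hdplen]
    have hdpA'hi : ∀ t : Nat, i+1 < t → dpA'.getD t 0 = 0 := by
      intro t ht
      rw [hdpA']
      split_ifs with hf
      · rw [pvGetD_set, if_neg (by omega)]; exact hdp0 t (by omega)
      · exact hdp0 t (by omega)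
    set dvA := dpA'.getD (i+1) 0 with hdvA
    have hstepA : pvStepA one zc (dp, cs, R) i =
        (dpA', cs.set (i+2) (PySem.Int.mod (cs.getD (i+1) 0 + dvA) 998244353), newR) := by
      simp only [pvStepA, ← hvA, ← hdpA', ← hdvA, ← hnewR]
    rw [hstepA, hstepB]
    set cs' := cs.set (i+2) (PySem.Int.mod (cs.getD (i+1) 0 + dvA) 998244353) with hcs'
    have hcl' : cs'.length = N+2 := by rw [hcs']; simp [hcslen]
    have hcsb' : ∀ t : Nat, 0 ≤ cs'.getD t 0 ∧ cs'.getD t 0 < 998244353 := by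
      intro t
      rw [hcs', pvGetD_set]
      split_ifs with hf
      · exact ⟨pvMod_nonneg _, pvMod_lt _⟩
      · exact hcsb t
    have hclause : ∀ t : Nat, newR ≤ (t:Int) → t ≤ i+2 → cs'.getD t 0 = cs'.getD newR.toNat 0 := by
      rcases le_or_gt R ((i:Int)+1) with hRc | hRc
      · -- R still points into the written prefix: everything in [R, i+2] equals cs[R]
        have hdvA0 : dvA = 0 := by
          rw [hdvA, hdpA']
          split_ifs with hf
          · rw [pvGetD_set, if_pos ⟨rfl, by omega⟩, hvA,
              pvPyGetD_toNat _ _ hR0, hcsR (i+1) (by omega) (by omega), sub_self, pvMod_zero]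
          · exact hdp0 (i+1) (by omega)
        have hAll : ∀ t : Nat, R ≤ (t:Int) → t ≤ i+2 → cs'.getD t 0 = cs.getD R.toNat 0 := by
          intro t h1 h2
          rcases Nat.lt_or_ge t (i+2) with hlt | hge
          · rw [hcs', pvGetD_set, if_neg (by omega)]
            exact hcsR t h1 (by omega)
          · have : t = i+2 := by omega
            subst this
            rw [hcs', pvGetD_set, if_pos ⟨rfl, by omega⟩, hdvA0, add_zero,
              pvMod_self_of_bounds _ (hcsb (i+1)).1 (hcsb (i+1)).2]
            exact hcsR (i+1) (by omega) (by omega)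
        intro t h1 h2
        rw [hAll t (le_trans hRRn h1) h2,
          hAll newR.toNat (by omega) (by omega)]
      · -- R already past the written prefix: the interval [newR, i+2] is at most the singleton {i+2}
        intro t h1 h2
        have h3 : newR ≤ (i:Int)+2 := le_trans h1 (by push_cast; omega)
        have h4 : ((i:Int)+2) ≤ newR := by
          rw [hnewR]
          have := le_max_left R (zc.getD (i+1) 0)
          omega
        have ht : t = i+2 := by omega
        have hnt : newR.toNat = i+2 := by omega
        rw [ht, hnt]
    refine Or.inr ⟨rfl, hnewR0, hnewRN, hdAl, hcl', rfl, hclause, ?_, hdpA'hi, hcsb'⟩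
    intro j hj
    dsimp only at hj
    exact hlive0' (j : Int) (le_trans hRRn hj)

-- the initial states satisfy the invariant (regime 1)
lemma pvRepGetD (L t : Nat) : (List.replicate L (0:Int)).getD t 0 = 0 := by
  simp [List.getD_eq_getElem?_getD, List.getElem?_replicate]
  split_ifs <;> simp

lemma pvInit (delta : List Int) (N : Nat) :
    pvInv delta N 0 ((List.replicate (N+1) (0:Int)).set 0 1, (List.replicate (N+2) (0:Int)).set 1 1, 0)
      ((PySem.Dict.empty : PySem.Dict Int Int).insert 0 1, 1, 0, 0) := by
  refine ⟨by simp [pvS_zero], Or.inl ?_⟩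
  have hdp0 : ∀ t : Nat, 0 < t → ((List.replicate (N+1) (0:Int)).set 0 1).getD t 0 = 0 := by
    intro t ht
    rw [pvGetD_set, if_neg (by omega), pvRepGetD]
  have hS1 : pvS ((List.replicate (N+1) (0:Int)).set 0 1) 1 = 1 := by
    rw [pvS_succ, pvS_zero, pvGetD_set, if_pos ⟨rfl, by simp⟩]
    ring
  refine ⟨?_, rfl, le_refl 0, by norm_num, by simp, by simp, ?_, ?_, hdp0, ?_⟩
  · intro j
    rcases Nat.eq_zero_or_pos j with h0 | hp
    · subst h0
      simp only [Nat.cast_zero]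
      rw [PySem.Dict.getD_insert, if_pos rfl, pvGetD_set, if_pos ⟨rfl, by simp⟩]
    · rw [PySem.Dict.getD_insert, if_neg (by exact_mod_cast Nat.pos_iff_ne_zero.mp hp),
        PySem.Dict.getD_empty, hdp0 j hp]
  · intro t ht
    interval_cases t
    · rw [pvGetD_set, if_neg (by omega), pvRepGetD, pvS_zero, pvMod_zero]
    · rw [pvGetD_set, if_pos ⟨rfl, by simp⟩, hS1, pvMod_one]
  · intro t ht
    rw [pvGetD_set, if_neg (by omega), pvRepGetD]
  · simp only [Int.toNat_zero, pvS_zero, hS1]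
    ring

-- the per-bit factors agree whenever the loop invariant holds at the end
lemma pvFinal (delta : List Int) (N : Nat) (a : List Int × List Int × Int)
    (b : PySem.Dict Int Int × Int × Int × Int)
    (h : pvInv delta N N a b) (ans : Int) :
    PySem.Int.mod (PySem.Int.mod (ans * (PySem.List.pyGetD a.2.1 (-1) 0 - PySem.List.pyGetD a.2.1 a.2.2 0)) 998244353) 998244353
      = PySem.Int.mod (ans * PySem.Int.mod b.2.1 998244353) 998244353 := by
  obtain ⟨dp, cs, R⟩ := a
  obtain ⟨live, w, cov, Rb⟩ := b
  obtain ⟨hcov, h⟩ := h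
  rcases h with h | h
  · obtain ⟨hlive, hbr, hR0, hRle, hdplen, hcslen, hcs, hcs0, hdp0, hw⟩ := h
    simp only at hlive hbr hR0 hRle hdplen hcslen hcs hcs0 hdp0 hw ⊢
    have hlast : PySem.List.pyGetD cs (-1) 0 = cs.getD (N+1) 0 := by
      rw [PySem.List.pyGetD_neg_ofNat cs 1 0 (by omega) (by omega),
        List.getD_eq_getElem?_getD, List.getElem?_eq_getElem (by omega)]
      simp [hcslen]
    have hpgR : PySem.List.pyGetD cs R 0 = cs.getD R.toNat 0 := pvPyGetD_toNat _ _ hR0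
    rw [hlast, hpgR, pvMod_mod, hcs (N+1) (by omega), hcs R.toNat (by omega)]
    apply pvMod_mul_congr
    rw [hw]
    simp only [pvMod_emod]
    rw [Int.emod_emod_of_dvd _ dvd_rfl, ← Int.sub_emod]
  · obtain ⟨hbr, hR0, hRN, hdplen, hcslen, hw0, hcsR, hlive0, hdp0, hcsb⟩ := h
    simp only at hbr hR0 hRN hdplen hcslen hw0 hcsR hlive0 hdp0 hcsb ⊢
    have hlast : PySem.List.pyGetD cs (-1) 0 = cs.getD (N+1) 0 := by
      rw [PySem.List.pyGetD_neg_ofNat cs 1 0 (by omega) (by omega),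
        List.getD_eq_getElem?_getD, List.getElem?_eq_getElem (by omega)]
      simp [hcslen]
    have hpgR : PySem.List.pyGetD cs R 0 = cs.getD R.toNat 0 := pvPyGetD_toNat _ _ hR0
    rw [hlast, hpgR, hcsR (N+1) (by omega) (by omega), sub_self, hw0]
    simp only [pvMod_zero, mul_zero]

-- per-bit equality of A's answer update and B's factor accumulation
lemma pvBit_eq (n : Int) (hn : 0 ≤ n) (conds : List (Int × Int × Int))
    (hc : ∀ c ∈ conds, (-(n+1) ≤ c.2.1 ∧ c.2.1 ≤ n) ∧
      ((c.2.2 = 0 ∧ pvPos c.2.1 n = 0) ∨ ((c.2.2 = 0 ∨ -n ≤ c.1) ∧ c.1 ≤ n + 1)))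
    (ans : Int) (bit : Nat) :
    pvBitA n conds ans bit = PySem.Int.mod (ans * pvFactorB n conds bit) 998244353 := by
  set N := n.toNat with hNdef
  have hN : (N:Int) = n := Int.toNat_of_nonneg hn
  have h1 : (n+1).toNat = N+1 := by omega
  have h2 : (n+2).toNat = N+2 := by omega
  have hc' : ∀ c ∈ conds, (-((N:Int)+1) ≤ c.2.1 ∧ c.2.1 ≤ (N:Int)) ∧
      ((c.2.2 = 0 ∧ pvPos c.2.1 N = 0) ∨ ((c.2.2 = 0 ∨ -(N:Int) ≤ c.1) ∧ c.1 ≤ (N:Int) + 1)) := by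
    intro c hcm
    rw [show ((N:Int) : Int) = n from hN]
    exact hc c hcm
  obtain ⟨hzlen, hznn, hzub⟩ := pvZcInv bit N conds hc'
    (List.replicate (N+1) 0) (List.replicate (N+1) 0) (by simp)
    (fun t => by rw [pvRepGetD]) (fun t ht => by rw [pvRepGetD]; omega)
  simp only [pvBitA, pvFactorB, h1, h2, ← hNdef]
  rw [pvSplitCond bit conds (List.replicate (N+1) 0) (List.replicate (N+1) 0)] at *
  set delta := conds.foldl (pvDeltaStepB bit) (List.replicate (N+1) (0:Int)) with hdelta
  set zc := conds.foldl (pvZeroStepB bit) (List.replicate (N+1) (0:Int)) with hzc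
  have hdlen : delta.length = N+1 := by
    rw [hdelta, pvDeltaLen]; simp
  have hone : ∀ i : Nat, i < N → (pvPrefixA delta N).getD i 0 = pvS delta (i+1) := by
    intro i hiN
    exact (pvPrefix_inv delta N hdlen N (le_refl N)).1 i (by omega)
  have hinv := pvFoldInv (pvStepA (pvPrefixA delta N) zc) (pvStepB delta zc) (pvInv delta N) N
    ((List.replicate (N+1) (0:Int)).set 0 1, (List.replicate (N+2) (0:Int)).set 1 1, 0)
    ((PySem.Dict.empty : PySem.Dict Int Int).insert 0 1, 1, 0, 0)
    (pvInit delta N) (fun i a b hi h => pvStepPres N (pvPrefixA delta N) delta zc hone hznn hzub i hi a b h)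
  exact pvFinal delta N _ _ hinv ans

-- ===== VERDICT (by name: the statement is the Claim_ definition above) =====
theorem count_distinct_arrays_spec : Claim_equal_count_distinct_arrays := by
  intro n k m conds hdom hpre
  show count_distinct_arrays n k m conds = count_distinct_arrays_alt n k m conds
  rcases hpre with hk | ⟨hn, hc⟩
  · have hk0 : k.toNat = 0 := by omega
    simp [count_distinct_arrays, count_distinct_arrays_alt, hk0]
  · simp only [count_distinct_arrays, count_distinct_arrays_alt]
    exact PySem.List.foldl_congr_mem _ _ _ _
      (fun acc bit _ => pvBit_eq n hn conds hc acc bit)
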